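-- pv_equiv track=rewrite | github.com/austral-prog/tp-7-JoacoDerito | loops_and_print.py | enumerate_list
-- ===== SOURCE A (Python) =====
-- def enumerate_list(list):
--     resultado= []
--     indice = 0
--     for i in list:
--         if i:
--             resultado.append(f"{indice}. {i}")
--             indice += 1
--     return resultado
-- ===== SOURCE B (Python) =====
-- def enumerate_list(list):
--     n = sum(1 for i in list if i)
--     out = []
--     for i in reversed(list):
--         if i:
--             n -= 1
--             out.append(f"{n}. {i}")
--     out.reverse()
--     return out
-- ===== Notes on version B (the rewrite author's own statement) =====
-- stated objective: alternative
-- what changed: B first counts the truthy items, then traverses the list in REVERSE building the output back-to-front with a countdown counter (each item's index is the number of truthy items before it, obtained by decrementing from the total), and finally reverses the result; A is a single forward pass with an incrementing counter.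
import Mathlib
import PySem

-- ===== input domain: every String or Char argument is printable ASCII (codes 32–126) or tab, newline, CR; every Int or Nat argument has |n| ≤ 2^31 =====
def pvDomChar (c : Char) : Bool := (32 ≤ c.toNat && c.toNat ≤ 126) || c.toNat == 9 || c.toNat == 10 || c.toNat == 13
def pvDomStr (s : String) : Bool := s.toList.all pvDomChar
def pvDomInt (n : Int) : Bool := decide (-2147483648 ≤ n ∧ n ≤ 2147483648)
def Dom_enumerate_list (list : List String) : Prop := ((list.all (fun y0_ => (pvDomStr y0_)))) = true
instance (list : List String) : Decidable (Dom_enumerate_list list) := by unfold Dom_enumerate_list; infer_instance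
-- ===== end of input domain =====

-- B counts the truthy items first, then builds the output back-to-front over the reversed
-- list with a countdown counter, reversing at the end (alternative traversal; same cost).


-- ===== PORT A =====
-- A's loop: accumulator 'resultado' and counter 'indice', appending on truthy items.
def enumLoopA : List String → List String → Int → List String
  | [], resultado, _ => resultado
  | i :: t, resultado, indice =>
    if i.isEmpty then enumLoopA t resultado indice
    else enumLoopA t (resultado ++ [PySem.Int.toStr indice ++ ". " ++ i]) (indice + 1)

def enumerate_list (list : List String) : List String := enumLoopA list [] 0

-- ===== PORT B =====
-- B: n = sum(1 for i in list if i); loop over reversed(list) with countdown; out.reverse().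
def enumerate_list_alt (list : List String) : List String :=
  let n : Int := list.foldl (fun a i => if i.isEmpty then a else a + 1) 0
  let st := list.reverse.foldl
    (fun (s : Int × List String) i =>
      if i.isEmpty then s
      else (s.1 - 1, s.2 ++ [PySem.Int.toStr (s.1 - 1) ++ ". " ++ i]))
    (n, [])
  st.2.reverse

-- ===== PRECONDITION & SPEC =====
def Spec_enumerate_list (list : List String) (out : List String) : Prop := out = enumerate_list_alt list
instance (list : List String) (out : List String) : Decidable (Spec_enumerate_list list out) := by unfold Spec_enumerate_list; infer_instance

-- ===== CLAIM (what is proved, stated in full; the proofs are below) =====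
def Claim_equal_enumerate_list : Prop := ∀ (list : List String), Dom_enumerate_list list → Spec_enumerate_list list (enumerate_list list)

-- ===== LEMMAS AND PROOFS =====
-- Canonical form: format a (already filtered) list starting at index 'base'.
def specList : List String → Int → List String
  | [], _ => []
  | x :: t, base => (PySem.Int.toStr base ++ ". " ++ x) :: specList t (base + 1)

theorem enumLoopA_eq (l : List String) : ∀ (res : List String) (k : Int),
    enumLoopA l res k = res ++ specList (l.filter (fun i => !i.isEmpty)) k := by
  induction l with
  | nil => intro res k; simp [enumLoopA, specList]
  | cons i t ih =>
    intro res k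
    by_cases h : i.isEmpty
    · simp [enumLoopA, h, List.filter, ih]
    · rw [enumLoopA, if_neg h, ih]
      simp [List.filter, h, specList]

theorem loopB_eq (l : List String) : ∀ (k : Int) (acc : List String),
    l.reverse.foldl
      (fun (s : Int × List String) i =>
        if i.isEmpty then s
        else (s.1 - 1, s.2 ++ [PySem.Int.toStr (s.1 - 1) ++ ". " ++ i]))
      (k, acc)
    = (k - ((l.filter (fun i => !i.isEmpty)).length : Int),
       acc ++ (specList (l.filter (fun i => !i.isEmpty))
                (k - ((l.filter (fun i => !i.isEmpty)).length : Int))).reverse) := by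
  induction l with
  | nil => intro k acc; simp [specList]
  | cons i t ih =>
    intro k acc
    rw [List.reverse_cons, List.foldl_append, ih]
    by_cases h : i.isEmpty
    · simp only [List.foldl_cons, List.foldl_nil, if_pos h]
      simp [List.filter, h]
    · simp only [List.foldl_cons, List.foldl_nil, if_neg h]
      simp only [List.filter, h, Bool.not_false]
      simp only [List.length_cons]
      push_cast
      have hc : k - ((t.filter (fun i => !i.isEmpty)).length : Int) - 1
          = k - (((t.filter (fun i => !i.isEmpty)).length : Int) + 1) := by ring
      rw [hc]
      have hd : k - (((t.filter (fun i => !i.isEmpty)).length : Int) + 1) + 1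
          = k - ((t.filter (fun i => !i.isEmpty)).length : Int) := by ring
      simp [specList, hd]

theorem countB_eq (l : List String) : ∀ (c : Int),
    l.foldl (fun a i => if i.isEmpty then a else a + 1) c
      = c + ((l.filter (fun i => !i.isEmpty)).length : Int) := by
  induction l with
  | nil => intro c; simp
  | cons i t ih =>
    intro c
    rw [List.foldl_cons, ih]
    by_cases h : i.isEmpty
    · rw [if_pos h]; simp [List.filter, h]
    · rw [if_neg h]; simp [List.filter, h]
      ring

-- ===== VERDICT (by name: the statement is the Claim_ definition above) =====
theorem enumerate_list_spec : Claim_equal_enumerate_list := by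
  intro l _
  show enumerate_list l = enumerate_list_alt l
  rw [enumerate_list, enumLoopA_eq]
  rw [enumerate_list_alt]
  simp only [countB_eq, zero_add, loopB_eq]
  simp
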